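-- pv_equiv track=rewrite | github.com/mathias1601/Advent-of-code-2025 | day3/part2.py | findGreatestDigit
-- ===== SOURCE A (Python) =====
-- def findGreatestDigit(number, originalNumber):
--
--     digit = int(number[0])
--     index = 0
--
--     for i in range(len(number)):
--         newDigit = int(number[i])
--
--         if newDigit > digit:
--             digit = newDigit
--             index = i
--
--     return digit, originalNumber[index + 1:]
-- ===== SOURCE B (Python) =====
-- def findGreatestDigit(number, originalNumber):
--     # One conversion pass, then try each digit value from 9 down to 0:
--     # the first one present is the greatest digit, and .index gives its
--     # first position.
--     values = [int(c) for c in number]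
--     for d in range(9, -1, -1):
--         if d in values:
--             return d, originalNumber[values.index(d) + 1:]
--     raise ValueError("empty input")
-- ===== Notes on version B (the rewrite author's own statement) =====
-- stated objective: alternative
-- what changed: Replaces A's index-tracking running-max loop with a membership search over the fixed digit alphabet: convert the string once to an int list, then for each digit value from 9 down to 0 test membership and return it with the tail after its first position (.index).
import Mathlib
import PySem

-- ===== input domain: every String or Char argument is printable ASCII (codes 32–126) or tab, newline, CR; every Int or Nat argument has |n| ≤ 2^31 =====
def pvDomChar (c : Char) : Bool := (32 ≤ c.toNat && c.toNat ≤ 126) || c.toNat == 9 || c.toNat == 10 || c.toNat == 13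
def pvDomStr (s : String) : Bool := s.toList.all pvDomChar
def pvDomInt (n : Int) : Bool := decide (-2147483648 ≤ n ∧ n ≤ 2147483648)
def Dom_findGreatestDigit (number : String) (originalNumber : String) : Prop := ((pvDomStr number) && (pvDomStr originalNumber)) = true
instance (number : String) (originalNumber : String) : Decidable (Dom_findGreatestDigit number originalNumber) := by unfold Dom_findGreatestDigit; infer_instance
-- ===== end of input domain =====

-- B drops A's running-max loop: one conversion pass, then it probes the digit values 9..0
-- and returns on the first one present; objective: alternative, same linear cost.

-- ===== PORT A =====
-- int(c) for a single digit character c; exact on Pre_ (digit characters only).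
def pvDigitVal (c : Char) : Int := (c.toNat : Int) - 48

-- the body of A's for-loop, as a named step function over the state (digit, index)
def pvStepA (cs : List Char) (s : Int × Nat) (i : Nat) : Int × Nat :=
  let newDigit : Int := pvDigitVal (cs.getD i '0')
  if s.1 < newDigit then (newDigit, i) else s

def findGreatestDigit (number : String) (originalNumber : String) : Int × String :=
  let cs := number.toList
  let digit : Int := pvDigitVal (cs.headD '0')      -- int(number[0]); Pre_ excludes the empty string
  let st : Int × Nat := (List.range cs.length).foldl (pvStepA cs) (digit, 0)
  (st.1, PySem.Str.slice originalNumber (some ((st.2 : Int) + 1)) none)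

-- ===== PORT B =====
-- B's for-loop over range(9, -1, -1); the [] case is unreachable under Pre_
-- (a nonempty digit list contains some d in 0..9), where the Python raises ValueError.
def pvScanB (values : List Int) (originalNumber : String) : List Int → Int × String
  | [] => (0, "")
  | d :: rest =>
      if d ∈ values then      -- d in values
        (d, PySem.Str.slice originalNumber (some (((PySem.List.index? values d).getD 0 : Int) + 1)) none)
      else pvScanB values originalNumber rest

def findGreatestDigit_alt (number : String) (originalNumber : String) : Int × String :=
  let values : List Int := number.toList.map pvDigitVal     -- [int(c) for c in number]; Pre_ excludes non-digits
  pvScanB values originalNumber (PySem.List.pyRange 9 (-1) (-1))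

-- ===== PRECONDITION & SPEC =====
-- Pre_ is exactly where the Python A returns: number nonempty (else number[0] raises IndexError)
-- and every character an ASCII digit (else int(...) raises ValueError).
def Pre_findGreatestDigit (number : String) (originalNumber : String) : Prop :=
  number.toList ≠ [] ∧ number.toList.all (fun c => 48 ≤ c.toNat && c.toNat ≤ 57) = true
instance (number : String) (originalNumber : String) : Decidable (Pre_findGreatestDigit number originalNumber) := by unfold Pre_findGreatestDigit; infer_instance

def pvWitness_findGreatestDigit : String × String := ("3152", "3152")

def Spec_findGreatestDigit (number : String) (originalNumber : String) (out : Int × String) : Prop := out = findGreatestDigit_alt number originalNumber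
instance (number : String) (originalNumber : String) (out : Int × String) : Decidable (Spec_findGreatestDigit number originalNumber out) := by unfold Spec_findGreatestDigit; infer_instance

-- ===== CLAIM (what is proved, stated in full; the proofs are below) =====
def Claim_equal_findGreatestDigit : Prop := ∀ (number : String) (originalNumber : String), Dom_findGreatestDigit number originalNumber → Pre_findGreatestDigit number originalNumber → Spec_findGreatestDigit number originalNumber (findGreatestDigit number originalNumber)

-- ===== LEMMAS AND PROOFS =====

-- A's loop invariant after processing range k (1 ≤ k ≤ cs.length):
-- the state holds the max digit value of the first k characters and the first index attaining it.
theorem loop_inv (cs : List Char) (k : Nat) (hk1 : 1 ≤ k) (hk : k ≤ cs.length) :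
    ((List.range k).foldl (pvStepA cs) (pvDigitVal (cs.headD '0'), 0)).2 < k ∧
    (∀ j, j < k → pvDigitVal (cs.getD j '0') ≤
        ((List.range k).foldl (pvStepA cs) (pvDigitVal (cs.headD '0'), 0)).1) ∧
    pvDigitVal (cs.getD ((List.range k).foldl (pvStepA cs) (pvDigitVal (cs.headD '0'), 0)).2 '0') =
        ((List.range k).foldl (pvStepA cs) (pvDigitVal (cs.headD '0'), 0)).1 ∧
    (∀ j, j < ((List.range k).foldl (pvStepA cs) (pvDigitVal (cs.headD '0'), 0)).2 →
        pvDigitVal (cs.getD j '0') <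
        ((List.range k).foldl (pvStepA cs) (pvDigitVal (cs.headD '0'), 0)).1) := by
  induction k with
  | zero => omega
  | succ k ih =>
    rcases Nat.eq_or_lt_of_le hk1 with h1 | h1
    · have hk0 : k = 0 := by omega
      subst hk0
      cases cs with
      | nil => simp at hk
      | cons x t => simp [List.range_succ, pvStepA]
    · have hk' : k ≤ cs.length := by omega
      have ihk := ih (by omega) hk'
      set r := (List.range k).foldl (pvStepA cs) (pvDigitVal (cs.headD '0'), 0) with hr
      obtain ⟨hlt, hub, heq, hfirst⟩ := ihk
      have hsplit : (List.range (k + 1)).foldl (pvStepA cs) (pvDigitVal (cs.headD '0'), 0)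
          = pvStepA cs r k := by
        rw [List.range_succ, List.foldl_append]
        rfl
      rw [hsplit]
      simp only [pvStepA]
      by_cases hcase : r.1 < pvDigitVal (cs.getD k '0')
      · rw [if_pos hcase]
        refine ⟨by omega, ?_, rfl, ?_⟩
        · intro j hj
          rcases Nat.lt_succ_iff_lt_or_eq.1 hj with hj' | hj'
          · exact le_of_lt (lt_of_le_of_lt (hub j hj') hcase)
          · subst hj'; exact le_refl _
        · intro j hj
          exact lt_of_le_of_lt (hub j hj) hcase
      · rw [if_neg hcase]
        refine ⟨by omega, ?_, heq, hfirst⟩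
        intro j hj
        rcases Nat.lt_succ_iff_lt_or_eq.1 hj with hj' | hj'
        · exact hub j hj'
        · subst hj'; omega

-- B's loop skips a digit value absent from values
theorem pvScanB_skip {values : List Int} {originalNumber : String} {d : Int} {rest : List Int}
    (h : d ∉ values) :
    pvScanB values originalNumber (d :: rest) = pvScanB values originalNumber rest := by
  simp [pvScanB, h]

-- B's loop, run on pre ++ v :: suf where no value of pre occurs, hits v
theorem pvScanB_run {values : List Int} {originalNumber : String} {v : Int} (pre : List Int)
    (suf : List Int) (hpre : ∀ d ∈ pre, d ∉ values) (hv : v ∈ values) :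
    pvScanB values originalNumber (pre ++ v :: suf) =
      (v, PySem.Str.slice originalNumber (some (((PySem.List.index? values v).getD 0 : Int) + 1)) none) := by
  induction pre with
  | nil => simp [pvScanB, hv]
  | cons d t ih =>
    rw [List.cons_append, pvScanB_skip (hpre d (by simp))]
    exact ih (fun x hx => hpre x (by simp [hx]))

-- range(9, -1, -1) is the descending digit list
theorem pyRange_digits : PySem.List.pyRange 9 (-1) (-1) = [9, 8, 7, 6, 5, 4, 3, 2, 1, 0] := by decide

-- every digit value splits the scanned list with only strictly greater values before it
theorem digit_split (v : Int) (h1 : 0 ≤ v) (h2 : v ≤ 9) :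
    ∃ pre suf, ([9, 8, 7, 6, 5, 4, 3, 2, 1, 0] : List Int) = pre ++ v :: suf ∧
      pre.all (fun d => decide (v < d)) = true := by
  interval_cases v <;> [
    exact ⟨[9, 8, 7, 6, 5, 4, 3, 2, 1], [], by decide, by decide⟩;
    exact ⟨[9, 8, 7, 6, 5, 4, 3, 2], [0], by decide, by decide⟩;
    exact ⟨[9, 8, 7, 6, 5, 4, 3], [1, 0], by decide, by decide⟩;
    exact ⟨[9, 8, 7, 6, 5, 4], [2, 1, 0], by decide, by decide⟩;
    exact ⟨[9, 8, 7, 6, 5], [3, 2, 1, 0], by decide, by decide⟩;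
    exact ⟨[9, 8, 7, 6], [4, 3, 2, 1, 0], by decide, by decide⟩;
    exact ⟨[9, 8, 7], [5, 4, 3, 2, 1, 0], by decide, by decide⟩;
    exact ⟨[9, 8], [6, 5, 4, 3, 2, 1, 0], by decide, by decide⟩;
    exact ⟨[9], [7, 6, 5, 4, 3, 2, 1, 0], by decide, by decide⟩;
    exact ⟨[], [8, 7, 6, 5, 4, 3, 2, 1, 0], by decide, by decide⟩]

theorem findGreatestDigit_spec : Claim_equal_findGreatestDigit := by
  intro number originalNumber _ hpre
  obtain ⟨hne, hdig⟩ := hpre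
  unfold Spec_findGreatestDigit findGreatestDigit findGreatestDigit_alt
  set cs := number.toList with hcs
  have hlen : 1 ≤ cs.length := by
    cases h : cs with
    | nil => exact absurd h hne
    | cons x t => simp
  obtain ⟨hlt, hub, heq, hfirst⟩ := loop_inv cs cs.length hlen (le_refl _)
  set r := (List.range cs.length).foldl (pvStepA cs) (pvDigitVal (cs.headD '0'), 0) with hrdef
  set values := cs.map pvDigitVal with hvalues
  have hvlen : values.length = cs.length := by simp [hvalues]
  have hvget : ∀ (j : Nat) (hj : j < cs.length), values[j]'(by omega) = pvDigitVal (cs[j]'hj) := by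
    intro j hj; simp [hvalues]
  -- values[r.2] = r.1, values bounded by r.1, earlier entries strictly below
  have hvr : values[r.2]'(by omega) = r.1 := by
    rw [hvget r.2 hlt, ← List.getD_eq_getElem cs '0' hlt]; exact heq
  have hvub : ∀ (j : Nat) (hj : j < cs.length), values[j]'(by omega) ≤ r.1 := by
    intro j hj
    rw [hvget j hj, ← List.getD_eq_getElem cs '0' hj]; exact hub j hj
  have hvfirst : ∀ (j : Nat) (hj : j < r.2), values[j]'(by omega) < r.1 := by
    intro j hj
    rw [hvget j (by omega), ← List.getD_eq_getElem cs '0' (by omega)]; exact hfirst j hj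
  have hmem : r.1 ∈ values := hvr ▸ List.getElem_mem (by omega)
  -- r.1 is a digit value: 0 ≤ r.1 ≤ 9
  have hrd : 0 ≤ r.1 ∧ r.1 ≤ 9 := by
    have hm := List.all_eq_true.1 hdig (cs[r.2]'hlt) (List.getElem_mem hlt)
    simp at hm
    rw [← hvr, hvget r.2 hlt]
    unfold pvDigitVal
    omega
  obtain ⟨pre, suf, hsplit, hgt⟩ := digit_split r.1 hrd.1 hrd.2
  have hpre' : ∀ d ∈ pre, d ∉ values := by
    intro d hd hdv
    obtain ⟨j, hj, hje⟩ := List.mem_iff_getElem.1 hdv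
    have h1 := hvub j (by omega)
    have h2 : r.1 < d := of_decide_eq_true (List.all_eq_true.1 hgt d hd)
    omega
  rw [pyRange_digits, hsplit, pvScanB_run pre suf hpre' hmem]
  -- values.index(r.1) is r.2: the first occurrence
  have hidx : PySem.List.index? values r.1 = some r.2 := by
    rw [PySem.List.index?_eq_some_iff]
    refine ⟨values.take r.2, values.drop (r.2 + 1), ?_, List.length_take_of_le (by omega), ?_⟩
    · rw [← hvr]
      conv_lhs => rw [← List.take_append_drop r.2 values]
      rw [← List.getElem_cons_drop (by omega)]
    · intro hmemtake
      obtain ⟨j, hj, hje⟩ := List.mem_iff_getElem.1 hmemtake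
      have hjlt : j < r.2 := by
        have := hj; rw [List.length_take] at this; omega
      rw [List.getElem_take] at hje
      have := hvfirst j hjlt
      omega
  rw [hidx]
  rfl
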